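/- GENERATED by farm/mkstatement.py from design/units.tsv (unit `DGifCloseFile.5`) and the assertions of Gif/Spec/Seg_DGifCloseFile.lean — do not edit.
   THE STATEMENT of the proof unit `DGifCloseFile.5`: segment 5 of `DGifCloseFile` (32 instructions; entries 0x109d13;
   exits ret; ranges 0x109d13-0x109d7c,0x109dc0-0x109dc8)
   takes each of its entry assertions to one of its exit assertions (`Gif.Spec.DGifCloseFile.Seg5`), given the contracts of its callees.
   What the names mean: ProgX/Base/Spec/Basic.lean (the shared hypotheses), Gif/Spec/Seg_DGifCloseFile.lean (the assertions). The theorem to prove: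
   `theorem DGifCloseFile_5_ok : Gif.Spec.DGifCloseFile_5.Statement`. -/
import Gif.Code
import Gif.Dec.All
import Gif.Labels
import Gif.Spec.Seg_DGifCloseFile
import ProgX.Base.Spec.Heap
namespace Gif.Spec.DGifCloseFile_5
open X86 X86.User Asan

/-- The statement of unit `DGifCloseFile.5`. -/
def Statement : Prop :=
  ∀ (Lay : Layout) (_hLay : Lay.hi = 0x1000000) (μ : Microarch) (_hμ : UserX.MicroOK μ) (u₀ : State)
    (_hcode : HasCodeNat Lay u₀ Gif.L.DGifCloseFile.entry Gif.Code.code_DGifCloseFile.nat Gif.L.DGifCloseFile.size)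
    (_h_asan_load8_noabort : Asan.SmallCheck Lay μ ProgX.Base.WayInv (ProgX.Base.CodeOK u₀) [.rax, .rcx, .rdx] 8 ProgX.Base.L.__asan_load8_noabort.entry)
    (_h_asan_load4_noabort : Asan.SmallCheck Lay μ ProgX.Base.WayInv (ProgX.Base.CodeOK u₀) [.rax, .rcx, .rdx] 4 ProgX.Base.L.__asan_load4_noabort.entry)
    (_h_free : ∀ (H : Heap) (rest : List Obj) (frames : List (Nat × FrameLayout)) (n : Nat), Calls Lay μ ProgX.Base.WayInv (ProgX.Base.conv u₀) ProgX.Base.L.free.entry (ProgX.Base.Spec.free.spec H rest frames n))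
    (_h_asan_store4_noabort : Asan.SmallCheck Lay μ ProgX.Base.WayInv (ProgX.Base.CodeOK u₀) [.rax, .rcx, .rdx] 4 ProgX.Base.L.__asan_store4_noabort.entry),
    Gif.Spec.DGifCloseFile.Seg5 Lay μ u₀

end Gif.Spec.DGifCloseFile_5
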